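-- pv_equiv track=rewrite | github.com/984-ISHU/kactl-python | content/graph/hopcroftKarp.py | dfs
-- ===== SOURCE A (Python) =====
-- def dfs(a, L, g, btoa, A, B):
--     if A[a] != L:
--         return False
--     A[a] = -1
--     for b in g[a]:
--         if B[b] == L + 1:
--             B[b] = 0
--             if btoa[b] == -1 or dfs(btoa[b], L + 1, g, btoa, A, B):
--                 btoa[b] = a
--                 return True
--     return False
-- ===== SOURCE B (Python) =====
-- def dfs(a, L, g, btoa, A, B):
--     # Iterative explicit-stack version of the recursive augmenting-path DFS.
--     # Return value (and the in-place mutations of A, B, btoa) match the recursion.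
--     if A[a] != L:
--         return False
--     A[a] = -1
--     stack = [(a, L, g[a], None)]  # frame: (node, level, remaining edges, edge used to enter node)
--     while stack:
--         node, lvl, row, via = stack[0]
--         if not row:
--             stack.pop(0)
--             continue
--         b = row[0]
--         stack[0] = (node, lvl, row[1:], via)
--         if B[b] == lvl + 1:
--             B[b] = 0
--             t = btoa[b]
--             if t == -1:
--                 btoa[b] = node
--                 for i in range(len(stack) - 1):
--                     btoa[stack[i][3]] = stack[i + 1][0]
--                 return True
--             if A[t] == lvl + 1:
--                 A[t] = -1
--                 stack.insert(0, (t, lvl + 1, g[t], b))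
--     return False
-- ===== Notes on version B (the rewrite author's own statement) =====
-- stated objective: alternative
-- what changed: The recursive augmenting-path DFS is replaced by an iterative traversal over an explicit stack of frames (node, level, remaining adjacency, entry edge), with the child's A[t]==L+1 entry check inlined at the parent and the chain of btoa reassignments performed by one walk over the stack on success.
-- outside the precondition, e.g. on dfs(0, 5, [[], [99]], [], [5], []): A returns False, B returns False
import Mathlib
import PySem

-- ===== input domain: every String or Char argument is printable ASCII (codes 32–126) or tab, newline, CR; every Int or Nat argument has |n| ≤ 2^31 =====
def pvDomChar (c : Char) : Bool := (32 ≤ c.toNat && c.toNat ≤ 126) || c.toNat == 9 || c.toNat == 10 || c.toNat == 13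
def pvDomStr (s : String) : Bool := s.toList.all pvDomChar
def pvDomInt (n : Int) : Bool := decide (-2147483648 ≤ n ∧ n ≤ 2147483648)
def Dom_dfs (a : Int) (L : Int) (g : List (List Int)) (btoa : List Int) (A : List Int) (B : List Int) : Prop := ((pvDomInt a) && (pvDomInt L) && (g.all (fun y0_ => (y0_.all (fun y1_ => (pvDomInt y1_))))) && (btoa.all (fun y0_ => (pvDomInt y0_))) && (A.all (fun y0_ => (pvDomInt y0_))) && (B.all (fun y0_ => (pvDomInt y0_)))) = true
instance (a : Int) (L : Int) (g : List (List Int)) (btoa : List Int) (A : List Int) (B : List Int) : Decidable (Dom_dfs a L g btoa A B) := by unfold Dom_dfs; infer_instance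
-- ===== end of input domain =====

-- B replaces A's recursive augmenting-path DFS by an iterative traversal over an explicit stack of
-- frames; equivalence is proved for the RETURN VALUE (in Python both versions also perform the same
-- in-place mutations of A, B and btoa, but only the return value is modelled here).
-- Both ports thread the mutated lists (btoa, A, B) as state.  The Nat fuel in both ports is only a
-- totality guard (a bound on recursion/stack depth): A.length + 2 levels can never be exceeded,
-- because entering a level k requires a cell of A to hold the value L+k (or -1), each cell's original
-- value matches at most one level and -1 matches at most one level.

-- ===== PORT A =====
-- literal transliteration of the recursive Python dfs; loopGo is its 'for b in g[a]' loop.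
mutual
def dfsGo (f : Nat) (a : Int) (L : Int) (g : List (List Int)) (btoa A B : List Int) :
    Bool × List Int × List Int × List Int :=
  match PySem.List.pyGet? A a with
  | none => (false, btoa, A, B)          -- IndexError in Python (outside Pre_)
  | some va =>
    if va ≠ L then (false, btoa, A, B)
    else
      match PySem.List.pyGet? g a with
      | none => (false, btoa, PySem.List.pySetD A a (-1), B)   -- IndexError (outside Pre_)
      | some row => loopGo f a L g row btoa (PySem.List.pySetD A a (-1)) B
  termination_by (f, 1, 0)

def loopGo (f : Nat) (a : Int) (L : Int) (g : List (List Int)) (row : List Int) (btoa A B : List Int) :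
    Bool × List Int × List Int × List Int :=
  match row with
  | [] => (false, btoa, A, B)
  | b :: rs =>
    match PySem.List.pyGet? B b with
    | none => loopGo f a L g rs btoa A B             -- IndexError (outside Pre_)
    | some vb =>
      if vb = L + 1 then
        match PySem.List.pyGet? btoa b with
        | none => loopGo f a L g rs btoa A (PySem.List.pySetD B b 0)   -- IndexError (outside Pre_)
        | some t =>
          if t = -1 then (true, PySem.List.pySetD btoa b a, A, PySem.List.pySetD B b 0)
          else
            match f with
            | 0 => loopGo 0 a L g rs btoa A (PySem.List.pySetD B b 0)  -- fuel guard, unreachable under Pre_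
            | f' + 1 =>
              match dfsGo f' t (L + 1) g btoa A (PySem.List.pySetD B b 0) with
              | (true, bt2, A2, B2) => (true, PySem.List.pySetD bt2 b a, A2, B2)
              | (false, bt2, A2, B2) => loopGo (f' + 1) a L g rs bt2 A2 B2
      else loopGo f a L g rs btoa A B
  termination_by (f, 0, row.length)
end

def dfs (a : Int) (L : Int) (g : List (List Int)) (btoa : List Int) (A : List Int) (B : List Int) : Bool :=
  (dfsGo (A.length + 2) a L g btoa A B).1

-- ===== PORT B =====
-- helpers for B's termination measure (cited by name in runB's decreasing_by)
theorem pv_mem_of_pyGet? {α : Type} {xs : List α} {i : Int} {x : α}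
    (h : PySem.List.pyGet? xs i = some x) : x ∈ xs := by
  unfold PySem.List.pyGet? at h
  cases hk : PySem.List.pyIdx? xs.length i with
  | none => rw [hk] at h; simp at h
  | some k => rw [hk] at h; exact List.mem_of_getElem? h

def pvMaxRow (g : List (List Int)) : Nat := g.foldr (fun r m => max r.length m) 0

theorem pvMaxRow_le {r : List Int} : ∀ {g : List (List Int)}, r ∈ g → r.length ≤ pvMaxRow g := by
  intro g
  induction g with
  | nil => intro h; cases h
  | cons x xs ih =>
    intro h
    rcases List.mem_cons.mp h with h1 | h2
    · subst h1
      exact Nat.le_max_left _ _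
    · have hx : pvMaxRow (x :: xs) = max x.length (pvMaxRow xs) := rfl
      rw [hx]
      exact le_trans (ih h2) (Nat.le_max_right _ _)

def pvMeasure (R : Nat) : List (Int × Int × List Int × Nat × Option Int) → Nat
  | [] => 0
  | (_, _, row, f, _) :: rest => (row.length + 1) * R ^ f + pvMeasure R rest

theorem pvMeasure_pop (R : Nat) (hR : 0 < R) {n l : Int} {row : List Int} {f : Nat}
    {v : Option Int} {rest : List (Int × Int × List Int × Nat × Option Int)} :
    pvMeasure R rest < pvMeasure R ((n, l, row, f, v) :: rest) := by
  have hp : 0 < R ^ f := pow_pos hR f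
  have h1 : pvMeasure R ((n, l, row, f, v) :: rest) = (row.length + 1) * R ^ f + pvMeasure R rest := rfl
  have h2 : 0 < (row.length + 1) * R ^ f := Nat.mul_pos (Nat.succ_pos _) hp
  omega

theorem pvMeasure_advance (R : Nat) (hR : 0 < R) {n l b : Int} {r : List Int} {f : Nat}
    {v : Option Int} {rest : List (Int × Int × List Int × Nat × Option Int)} :
    pvMeasure R ((n, l, r, f, v) :: rest) < pvMeasure R ((n, l, b :: r, f, v) :: rest) := by
  have hp : 0 < R ^ f := pow_pos hR f
  have h1 : pvMeasure R ((n, l, b :: r, f, v) :: rest) = ((b :: r).length + 1) * R ^ f + pvMeasure R rest := rfl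
  have h1' : pvMeasure R ((n, l, r, f, v) :: rest) = (r.length + 1) * R ^ f + pvMeasure R rest := rfl
  rw [show (b :: r).length = r.length + 1 from rfl] at h1
  have h4 : (r.length + 1 + 1) * R ^ f = (r.length + 1) * R ^ f + R ^ f := by ring
  omega

theorem pvMeasure_push (R : Nat) {t l2 : Int} {rowt : List Int} {f' : Nat} {vb : Option Int}
    {n l b : Int} {r : List Int} {v : Option Int}
    {rest : List (Int × Int × List Int × Nat × Option Int)} (hlen : rowt.length + 1 < R) :
    pvMeasure R ((t, l2, rowt, f', vb) :: (n, l, r, f' + 1, v) :: rest) <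
      pvMeasure R ((n, l, b :: r, f' + 1, v) :: rest) := by
  have hR : 0 < R := by omega
  have hp : 0 < R ^ f' := pow_pos hR f'
  have h1 : pvMeasure R ((t, l2, rowt, f', vb) :: (n, l, r, f' + 1, v) :: rest) =
      (rowt.length + 1) * R ^ f' + ((r.length + 1) * R ^ (f' + 1) + pvMeasure R rest) := rfl
  have h2 : pvMeasure R ((n, l, b :: r, f' + 1, v) :: rest) =
      ((b :: r).length + 1) * R ^ (f' + 1) + pvMeasure R rest := rfl
  rw [show (b :: r).length = r.length + 1 from rfl] at h2
  have h4 : (r.length + 1 + 1) * R ^ (f' + 1) = (r.length + 1) * R ^ (f' + 1) + R ^ (f' + 1) := by ring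
  have h5 : (rowt.length + 1) * R ^ f' < R ^ (f' + 1) := by
    calc (rowt.length + 1) * R ^ f' < R * R ^ f' := mul_lt_mul_of_pos_right hlen hp
      _ = R ^ (f' + 1) := by ring
  omega

-- the 'btoa[stack[i][3]] = stack[i+1][0]' walk of Source B's success path
def chainB (btoa : List Int) : List (Int × Int × List Int × Nat × Option Int) → List Int
  | (_, _, _, _, some v) :: p :: rest => chainB (PySem.List.pySetD btoa v p.1) (p :: rest)
  | _ => btoa

-- the while-loop of Source B: a stack of frames (node, level, remaining edges, fuel, entry edge)
def runB (g : List (List Int)) (stack : List (Int × Int × List Int × Nat × Option Int))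
    (btoa A B : List Int) : Bool × List Int × List Int × List Int :=
  match stack with
  | [] => (false, btoa, A, B)
  | (_, _, [], _, _) :: rest => runB g rest btoa A B
  | (node, lvl, b :: rrow, f, via) :: rest =>
    match PySem.List.pyGet? B b with
    | none => runB g ((node, lvl, rrow, f, via) :: rest) btoa A B       -- IndexError (outside Pre_)
    | some vb =>
      if vb = lvl + 1 then
        match PySem.List.pyGet? btoa b with
        | none => runB g ((node, lvl, rrow, f, via) :: rest) btoa A (PySem.List.pySetD B b 0)
        | some t =>
          if t = -1 then
            (true, chainB (PySem.List.pySetD btoa b node) ((node, lvl, rrow, f, via) :: rest),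
             A, PySem.List.pySetD B b 0)
          else
            match f with
            | 0 => runB g ((node, lvl, rrow, 0, via) :: rest) btoa A (PySem.List.pySetD B b 0)
            | f' + 1 =>
              match PySem.List.pyGet? A t with
              | none => runB g ((node, lvl, rrow, f' + 1, via) :: rest) btoa A (PySem.List.pySetD B b 0)
              | some vt =>
                if vt = lvl + 1 then
                  match hrow : PySem.List.pyGet? g t with
                  | none => runB g ((node, lvl, rrow, f' + 1, via) :: rest) btoa
                      (PySem.List.pySetD A t (-1)) (PySem.List.pySetD B b 0)
                  | some rowt => runB g ((t, lvl + 1, rowt, f', some b) :: (node, lvl, rrow, f' + 1, via) :: rest)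
                      btoa (PySem.List.pySetD A t (-1)) (PySem.List.pySetD B b 0)
                else runB g ((node, lvl, rrow, f' + 1, via) :: rest) btoa A (PySem.List.pySetD B b 0)
      else runB g ((node, lvl, rrow, f, via) :: rest) btoa A B
  termination_by pvMeasure (pvMaxRow g + 2) stack
  decreasing_by
    all_goals first
      | exact pvMeasure_pop _ (by omega)
      | exact pvMeasure_advance _ (by omega)
      | exact pvMeasure_push _ (by have h1 := pvMaxRow_le (pv_mem_of_pyGet? hrow); omega)

def dfs_alt (a : Int) (L : Int) (g : List (List Int)) (btoa : List Int) (A : List Int) (B : List Int) : Bool :=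
  match PySem.List.pyGet? A a with
  | none => false
  | some va =>
    if va ≠ L then false
    else
      match PySem.List.pyGet? g a with
      | none => false
      | some row => (runB g [(a, L, row, A.length + 2, none)] btoa (PySem.List.pySetD A a (-1)) B).1

-- ===== PRECONDITION & SPEC =====
-- Pre_ excludes exactly the index accesses on which Python raises IndexError; it is conservative:
-- when the initial A[a] == L check passes it requires ALL adjacency entries and btoa entries to be
-- in range (out-of-range cells would raise if reached), so it also excludes some runs that return
-- False before touching an out-of-range cell.
def Pre_dfs (a : Int) (L : Int) (g : List (List Int)) (btoa : List Int) (A : List Int) (B : List Int) : Prop :=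
  PySem.Raise.InRange A.length a ∧
  (PySem.List.pyGet? A a = some L →
    PySem.Raise.InRange g.length a ∧
    (∀ row ∈ g, ∀ b ∈ row, PySem.Raise.InRange B.length b ∧ PySem.Raise.InRange btoa.length b) ∧
    (∀ t ∈ btoa, t = -1 ∨ (PySem.Raise.InRange A.length t ∧ PySem.Raise.InRange g.length t)))
instance (a : Int) (L : Int) (g : List (List Int)) (btoa : List Int) (A : List Int) (B : List Int) : Decidable (Pre_dfs a L g btoa A B) := by unfold Pre_dfs; infer_instance

def pvWitness_dfs : Int × Int × List (List Int) × List Int × List Int × List Int :=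
  (0, 1, [[0]], [-1], [1], [2])

def Spec_dfs (a : Int) (L : Int) (g : List (List Int)) (btoa : List Int) (A : List Int) (B : List Int) (out : Bool) : Prop := out = dfs_alt a L g btoa A B
instance (a : Int) (L : Int) (g : List (List Int)) (btoa : List Int) (A : List Int) (B : List Int) (out : Bool) : Decidable (Spec_dfs a L g btoa A B out) := by unfold Spec_dfs; infer_instance

-- ===== CLAIM (what is proved, stated in full; the proofs are below) =====
def Claim_equal_dfs : Prop := ∀ (a : Int) (L : Int) (g : List (List Int)) (btoa : List Int) (A : List Int) (B : List Int), Dom_dfs a L g btoa A B → Pre_dfs a L g btoa A B → Spec_dfs a L g btoa A B (dfs a L g btoa A B)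

-- ===== LEMMAS AND PROOFS =====
theorem chainB_row (r1 r2 : List Int) {bt : List Int} {n l : Int} {f : Nat} {v : Option Int}
    {rest : List (Int × Int × List Int × Nat × Option Int)} :
    chainB bt ((n, l, r1, f, v) :: rest) = chainB bt ((n, l, r2, f, v) :: rest) := by
  cases v with
  | none => cases rest with | nil => rfl | cons p rs => rfl
  | some x => cases rest with | nil => rfl | cons p rs => rfl

theorem runB_nil (g : List (List Int)) (bt A B : List Int) :
    runB g [] bt A B = (false, bt, A, B) := by
  rw [runB.eq_def]

-- a failed step continues the parent's loop: turn the row-IH into the goal with the longer row in chainB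
theorem contStep (g : List (List Int)) (f : Nat) (r : List Int) (a L : Int) (via : Option Int)
    (rest : List (Int × Int × List Int × Nat × Option Int)) (bt A B : List Int)
    (ih : runB g ((a, L, r, f, via) :: rest) bt A B =
      (match loopGo f a L g r bt A B with
       | (true, bt', A', B') => (true, chainB bt' ((a, L, r, f, via) :: rest), A', B')
       | (false, bt', A', B') => runB g rest bt' A' B')) (b : Int) :
    runB g ((a, L, r, f, via) :: rest) bt A B =
      (match loopGo f a L g r bt A B with
       | (true, bt', A', B') => (true, chainB bt' ((a, L, b :: r, f, via) :: rest), A', B')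
       | (false, bt', A', B') => runB g rest bt' A' B') := by
  rw [ih]
  rcases hE : loopGo f a L g r bt A B with ⟨tf, c1, c2, c3⟩
  cases tf with
  | false => rfl
  | true => dsimp only; rw [chainB_row r (b :: r)]

-- the simulation lemma: the machine run from a frame equals A's loop at that frame, with the
-- pending chain reassignments of the frames below performed on success
theorem sim (g : List (List Int)) : ∀ (f : Nat) (row : List Int) (a L : Int) (via : Option Int)
    (rest : List (Int × Int × List Int × Nat × Option Int)) (bt A B : List Int),
    runB g ((a, L, row, f, via) :: rest) bt A B =
      (match loopGo f a L g row bt A B with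
       | (true, bt', A', B') => (true, chainB bt' ((a, L, row, f, via) :: rest), A', B')
       | (false, bt', A', B') => runB g rest bt' A' B') := by
  intro f
  induction f with
  | zero =>
    intro row
    induction row with
    | nil =>
      intro a L via rest bt A B
      conv_lhs => rw [runB.eq_def]
      conv_rhs => rw [loopGo.eq_def]
    | cons b r ih =>
      intro a L via rest bt A B
      conv_lhs => rw [runB.eq_def]
      conv_rhs => rw [loopGo.eq_def]
      dsimp only
      cases hB : PySem.List.pyGet? B b with
      | none =>
        dsimp only
        exact contStep g 0 r a L via rest bt A B (ih a L via rest bt A B) b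
      | some vb =>
        dsimp only
        by_cases hvb : vb = L + 1
        · simp only [if_pos hvb]
          cases hbt : PySem.List.pyGet? bt b with
          | none =>
            dsimp only
            exact contStep g 0 r a L via rest bt A (PySem.List.pySetD B b 0)
              (ih a L via rest bt A (PySem.List.pySetD B b 0)) b
          | some t =>
            dsimp only
            by_cases ht : t = -1
            · simp only [if_pos ht]
              try dsimp only
              rw [chainB_row r (b :: r)]
            · simp only [if_neg ht]
              try dsimp only
              exact contStep g 0 r a L via rest bt A (PySem.List.pySetD B b 0)
                (ih a L via rest bt A (PySem.List.pySetD B b 0)) b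
        · simp only [if_neg hvb]
          exact contStep g 0 r a L via rest bt A B (ih a L via rest bt A B) b
  | succ f' ihf =>
    intro row
    induction row with
    | nil =>
      intro a L via rest bt A B
      conv_lhs => rw [runB.eq_def]
      conv_rhs => rw [loopGo.eq_def]
    | cons b r ih =>
      intro a L via rest bt A B
      conv_lhs => rw [runB.eq_def]
      conv_rhs => rw [loopGo.eq_def]
      dsimp only
      cases hB : PySem.List.pyGet? B b with
      | none =>
        dsimp only
        exact contStep g (f' + 1) r a L via rest bt A B (ih a L via rest bt A B) b
      | some vb =>
        dsimp only
        by_cases hvb : vb = L + 1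
        · simp only [if_pos hvb]
          cases hbt : PySem.List.pyGet? bt b with
          | none =>
            dsimp only
            exact contStep g (f' + 1) r a L via rest bt A (PySem.List.pySetD B b 0)
              (ih a L via rest bt A (PySem.List.pySetD B b 0)) b
          | some t =>
            dsimp only
            by_cases ht : t = -1
            · simp only [if_pos ht]
              try dsimp only
              rw [chainB_row r (b :: r)]
            · simp only [if_neg ht]
              try dsimp only
              cases hA2 : PySem.List.pyGet? A t with
              | none =>
                have hd : dfsGo f' t (L + 1) g bt A (PySem.List.pySetD B b 0) =
                    (false, bt, A, PySem.List.pySetD B b 0) := by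
                  conv_lhs => rw [dfsGo.eq_def]
                  rw [hA2]
                rw [hd]
                dsimp only
                exact contStep g (f' + 1) r a L via rest bt A (PySem.List.pySetD B b 0)
                  (ih a L via rest bt A (PySem.List.pySetD B b 0)) b
              | some vt =>
                dsimp only
                by_cases hvt : vt = L + 1
                · simp only [if_pos hvt]
                  cases hg2 : PySem.List.pyGet? g t with
                  | none =>
                    have hd : dfsGo f' t (L + 1) g bt A (PySem.List.pySetD B b 0) =
                        (false, bt, PySem.List.pySetD A t (-1), PySem.List.pySetD B b 0) := by
                      conv_lhs => rw [dfsGo.eq_def]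
                      rw [hA2]
                      dsimp only
                      rw [if_neg (fun h => h hvt)]
                      rw [hg2]
                    rw [hd]
                    dsimp only
                    exact contStep g (f' + 1) r a L via rest bt (PySem.List.pySetD A t (-1))
                      (PySem.List.pySetD B b 0)
                      (ih a L via rest bt (PySem.List.pySetD A t (-1)) (PySem.List.pySetD B b 0)) b
                  | some rowt =>
                    have hd : dfsGo f' t (L + 1) g bt A (PySem.List.pySetD B b 0) =
                        loopGo f' t (L + 1) g rowt bt (PySem.List.pySetD A t (-1)) (PySem.List.pySetD B b 0) := by
                      conv_lhs => rw [dfsGo.eq_def]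
                      rw [hA2]
                      dsimp only
                      rw [if_neg (fun h => h hvt)]
                      rw [hg2]
                    dsimp only
                    rw [hd]
                    rw [ihf rowt t (L + 1) (some b) ((a, L, r, f' + 1, via) :: rest) bt
                      (PySem.List.pySetD A t (-1)) (PySem.List.pySetD B b 0)]
                    rcases hE : loopGo f' t (L + 1) g rowt bt (PySem.List.pySetD A t (-1))
                      (PySem.List.pySetD B b 0) with ⟨tf, c1, c2, c3⟩
                    cases tf with
                    | false =>
                      dsimp only
                      exact contStep g (f' + 1) r a L via rest c1 c2 c3 (ih a L via rest c1 c2 c3) b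
                    | true =>
                      dsimp only
                      rw [show chainB c1 ((t, L + 1, rowt, f', some b) :: (a, L, r, f' + 1, via) :: rest) =
                          chainB (PySem.List.pySetD c1 b a) ((a, L, r, f' + 1, via) :: rest) from rfl]
                      rw [chainB_row r (b :: r)]
                · simp only [if_neg hvt]
                  have hd : dfsGo f' t (L + 1) g bt A (PySem.List.pySetD B b 0) =
                      (false, bt, A, PySem.List.pySetD B b 0) := by
                    conv_lhs => rw [dfsGo.eq_def]
                    rw [hA2]
                    dsimp only
                    rw [if_pos hvt]
                  rw [hd]
                  dsimp only
                  exact contStep g (f' + 1) r a L via rest bt A (PySem.List.pySetD B b 0)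
                    (ih a L via rest bt A (PySem.List.pySetD B b 0)) b
        · simp only [if_neg hvb]
          exact contStep g (f' + 1) r a L via rest bt A B (ih a L via rest bt A B) b

-- ===== VERDICT (by name: the statement is the Claim_ definition above) =====
theorem dfs_spec : Claim_equal_dfs := by
  unfold Claim_equal_dfs
  intro a L g btoa A B _hDom _hPre
  unfold Spec_dfs
  unfold dfs dfs_alt
  conv_lhs => rw [dfsGo.eq_def]
  cases hA : PySem.List.pyGet? A a with
  | none => rfl
  | some va =>
    dsimp only
    by_cases hva : va ≠ L
    · simp only [if_pos hva]
    · simp only [if_neg hva]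
      cases hg : PySem.List.pyGet? g a with
      | none => rfl
      | some row =>
        dsimp only
        rw [sim g (A.length + 2) row a L none [] btoa (PySem.List.pySetD A a (-1)) B]
        rcases hE : loopGo (A.length + 2) a L g row btoa (PySem.List.pySetD A a (-1)) B with
          ⟨tf, c1, c2, c3⟩
        cases tf with
        | false =>
          dsimp only
          rw [runB_nil]
        | true => rfl
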